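-- pv_equiv track=rewrite | github.com/Razmo99/Tenderizer | Tenderizer/stringarranger.py | get_duplicate_chars
-- ===== SOURCE A (Python) =====
-- def get_duplicate_chars(string,dup_chars):
--     str_len=len(string) - 1
--     results=[]
--     for index,char in enumerate(string):
--         if char in dup_chars:
--             if index < str_len:
--                 ahead=index+1
--             else:
--                 ahead=index
--             #ahead=index+1 if index < str_len else index
--             if index < str_len and string[ahead] == char:
--                 results.append(ahead)
--     return results
-- ===== SOURCE B (Python) =====
-- def get_duplicate_chars(string, dup_chars):
--     # Run-based single pass: collapse the string into maximal runs of equal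
--     # characters; a run of length L starting at i whose character is in
--     # dup_chars contributes the indices i+1 .. i+L-1.
--     results = []
--     n = len(string)
--     i = 0
--     while i < n:
--         j = i + 1
--         while j < n and string[j] == string[i]:
--             j += 1
--         if string[i] in dup_chars:
--             results.extend(range(i + 1, j))
--         i = j
--     return results
-- ===== Notes on version B (the rewrite author's own statement) =====
-- stated objective: alternative
-- what changed: Replaced A's per-character enumerate loop with a look-ahead and bounds check by a run-based pass that splits the string into maximal runs of equal characters and expands each run whose character is in dup_chars into the index range start+1..start+len-1.
import Mathlib
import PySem

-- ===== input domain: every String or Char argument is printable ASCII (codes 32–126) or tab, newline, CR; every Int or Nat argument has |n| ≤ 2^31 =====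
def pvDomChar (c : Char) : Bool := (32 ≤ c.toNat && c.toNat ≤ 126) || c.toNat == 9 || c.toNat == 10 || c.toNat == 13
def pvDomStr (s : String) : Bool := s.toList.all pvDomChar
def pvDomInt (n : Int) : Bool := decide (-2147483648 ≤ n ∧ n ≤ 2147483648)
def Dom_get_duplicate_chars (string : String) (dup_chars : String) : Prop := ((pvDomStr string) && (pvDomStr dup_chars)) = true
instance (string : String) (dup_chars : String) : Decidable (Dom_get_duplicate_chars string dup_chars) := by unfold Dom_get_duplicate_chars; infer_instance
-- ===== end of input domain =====

-- B replaces A's per-character look-ahead with a single run-based pass that expands each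
-- qualifying run of equal characters into its duplicate indices (objective: alternative).

-- ===== PORT A =====
def get_duplicate_chars (string : String) (dup_chars : String) : List Int :=
  let str_len : Int := (string.toList.length : Int) - 1
  (PySem.List.enumerate string.toList 0).foldl
    (fun results p =>
      if PySem.Chars.isIn [p.2] dup_chars.toList then
        let ahead : Int := if p.1 < str_len then p.1 + 1 else p.1
        if p.1 < str_len ∧ PySem.List.pyGet? string.toList ahead = some p.2 then
          results ++ [ahead]
        else results
      else results) []

-- ===== PORT B =====
-- inner while loop: length of the leading run of `c` and the remainder
def pvTakeRun (c : Char) : List Char → Nat × List Char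
  | [] => (0, [])
  | x :: xs => if x = c then ((pvTakeRun c xs).1 + 1, (pvTakeRun c xs).2) else (0, x :: xs)

theorem pvTakeRun_length_le (c : Char) (xs : List Char) : (pvTakeRun c xs).2.length ≤ xs.length := by
  induction xs with
  | nil => simp [pvTakeRun]
  | cons x xs ih =>
    by_cases h : x = c
    · simp [pvTakeRun, h]; omega
    · simp [pvTakeRun, h]

-- outer while loop of Source B, one step per maximal run
def pvRuns (dup : List Char) : List Char → Int → List Int
  | [], _ => []
  | c :: rest, i =>
    let p := pvTakeRun c rest
    (if PySem.Chars.isIn [c] dup then PySem.List.pyRange (i + 1) (i + 1 + p.1) 1 else [])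
      ++ pvRuns dup p.2 (i + 1 + p.1)
termination_by cs _ => cs.length
decreasing_by exact Nat.lt_succ_of_le (pvTakeRun_length_le _ _)

def get_duplicate_chars_alt (string : String) (dup_chars : String) : List Int :=
  pvRuns dup_chars.toList string.toList 0

-- ===== PRECONDITION & SPEC =====
def Spec_get_duplicate_chars (string : String) (dup_chars : String) (out : List Int) : Prop := out = get_duplicate_chars_alt string dup_chars
instance (string : String) (dup_chars : String) (out : List Int) : Decidable (Spec_get_duplicate_chars string dup_chars out) := by unfold Spec_get_duplicate_chars; infer_instance

-- ===== CLAIM (what is proved, stated in full; the proofs are below) =====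
def Claim_equal_get_duplicate_chars : Prop := ∀ (string : String) (dup_chars : String), Dom_get_duplicate_chars string dup_chars → Spec_get_duplicate_chars string dup_chars (get_duplicate_chars string dup_chars)

-- ===== LEMMAS AND PROOFS =====

-- pairwise (look-ahead) characterisation of A's loop, used as a bridge between the two ports
def pairF (dup : List Char) : List Char → Int → List Int
  | [], _ => []
  | [_], _ => []
  | c1 :: c2 :: rest, i =>
    (if PySem.Chars.isIn [c1] dup ∧ c2 = c1 then [i + 1] else []) ++ pairF dup (c2 :: rest) (i + 1)

theorem foldA (dup : List Char) : ∀ (suf pre : List Char) (acc : List Int),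
    (PySem.List.enumerate suf (pre.length : Int)).foldl
      (fun results p =>
        if PySem.Chars.isIn [p.2] dup then
          let ahead : Int :=
            if p.1 < ((pre ++ suf).length : Int) - 1 then p.1 + 1 else p.1
          if p.1 < ((pre ++ suf).length : Int) - 1 ∧
              PySem.List.pyGet? (pre ++ suf) ahead = some p.2 then
            results ++ [ahead]
          else results
        else results) acc
    = acc ++ pairF dup suf (pre.length : Int) := by
  intro suf
  induction suf with
  | nil => intro pre acc; simp [pairF, PySem.List.enumerate_nil]
  | cons c suf ih =>
    intro pre acc
    rw [PySem.List.enumerate_cons, List.foldl_cons]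
    cases suf with
    | nil =>
      simp [pairF, PySem.List.enumerate_nil]
    | cons c2 rest =>
      have hlt : (pre.length : Int) < ((pre ++ c :: c2 :: rest).length : Int) - 1 := by
        simp only [List.length_append, List.length_cons]
        push_cast; omega
      have hget : PySem.List.pyGet? (pre ++ c :: c2 :: rest) ((pre.length : Int) + 1)
          = some c2 := by
        have : pre ++ c :: c2 :: rest = (pre ++ [c]) ++ c2 :: rest := by simp
        rw [this]
        have hlen : ((pre ++ [c]).length : Int) = (pre.length : Int) + 1 := by simp
        rw [← hlen, PySem.List.pyGet?_append_length]
      have hstep := ih (pre ++ [c])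
      have hL : (pre ++ [c]) ++ c2 :: rest = pre ++ c :: c2 :: rest := by simp
      have hlen2 : (((pre ++ [c]).length : Nat) : Int) = (pre.length : Int) + 1 := by
        simp
      rw [hL, hlen2] at hstep
      rw [hstep]
      simp only [pairF]
      simp only [hlt, if_true, true_and, hget, Option.some.injEq]
      by_cases hin : PySem.Chars.isIn [c] dup <;> by_cases heq : c2 = c <;>
        simp [hin, heq]

theorem pairF_eq_pvRuns (dup : List Char) : ∀ (cs : List Char) (i : Int),
    pairF dup cs i = pvRuns dup cs i
  | [], i => by simp [pairF, pvRuns]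
  | [c], i => by
    simp [pairF, pvRuns, pvTakeRun, PySem.List.pyRange_one_eq_nil (by omega : i + 1 ≤ i + 1)]
  | c :: c2 :: rest, i => by
    by_cases heq : c2 = c
    · subst heq
      have ih := pairF_eq_pvRuns dup (c2 :: rest) (i + 1)
      have hrun : pvTakeRun c2 (c2 :: rest)
          = ((pvTakeRun c2 rest).1 + 1, (pvTakeRun c2 rest).2) := by
        simp [pvTakeRun]
      rw [pvRuns, hrun]
      rw [pvRuns] at ih
      simp only [pairF, ih]
      have e1 : i + 1 + 1 + ((pvTakeRun c2 rest).1 : Int) = i + 2 + (pvTakeRun c2 rest).1 := by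
        ring
      have e2 : i + 1 + (((pvTakeRun c2 rest).1 : Int) + 1) = i + 2 + (pvTakeRun c2 rest).1 := by
        ring
      simp only [e1]
      push_cast
      simp only [e2]
      have hcons : PySem.List.pyRange (i + 1) (i + 2 + ((pvTakeRun c2 rest).1 : Int)) 1
          = (i + 1) :: PySem.List.pyRange (i + 1 + 1) (i + 2 + ((pvTakeRun c2 rest).1 : Int)) 1 := by
        rw [PySem.List.pyRange_one_cons (by omega)]
      have e3 : i + 1 + 1 = i + 2 := by ring
      rw [hcons, e3]
      by_cases hin : PySem.Chars.isIn [c2] dup <;> simp [hin]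
    · have ih := pairF_eq_pvRuns dup (c2 :: rest) (i + 1)
      have hrun : pvTakeRun c (c2 :: rest) = (0, c2 :: rest) := by
        simp [pvTakeRun, heq]
      rw [pvRuns, hrun]
      simp only [pairF, heq, and_false, if_false, List.nil_append, ih]
      simp [PySem.List.pyRange_one_eq_nil (by omega : i + 1 ≤ i + 1)]
  termination_by cs _ => cs.length

-- ===== VERDICT (by name: the statement is the Claim_ definition above) =====
theorem get_duplicate_chars_spec : Claim_equal_get_duplicate_chars := by
  intro s d _
  unfold Spec_get_duplicate_chars
  simp only [get_duplicate_chars, get_duplicate_chars_alt]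
  have h := foldA d.toList s.toList [] []
  rw [pairF_eq_pvRuns] at h
  simpa using h
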